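-- pv_equiv track=rewrite | github.com/SwipeSavdev/swipe-savvy-rewards | swipesavvy-ai-agents/app/services/fiserv_boarding_service.py | _build_hierarchy_xml
-- ===== SOURCE A (Python) =====
-- from typing import Optional, Dict, Any, List
--
-- def _build_hierarchy_xml(hierarchy: List[Dict[str, Any]]) -> str:
--     """Build XML for merchant hierarchy"""
--     if not hierarchy:
--         return ""
--
--     level_elements = []
--     for level in hierarchy:
--         level_elements.append(f"""
--     <HierarchyLevel>
--         <LevelCode>{level.get('levelCode', '')}</LevelCode>
--         <MerchantName>{level.get('merchantName', '')}</MerchantName>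
--         <AddressAttentionText>{level.get('addressAttentionText', '')}</AddressAttentionText>
--         <Address1Text>{level.get('address1Text', '')}</Address1Text>
--         <CityName>{level.get('cityName', '')}</CityName>
--         <StateCode>{level.get('stateCode', '')}</StateCode>
--         <CountryCode>{level.get('countryCode', 'US')}</CountryCode>
--         <PostalCode>{level.get('postalCode', '')}</PostalCode>
--         <PhoneNumber>{level.get('phoneNumber', '')}</PhoneNumber>
--     </HierarchyLevel>""")
--
--     return "\n".join(level_elements)
-- ===== SOURCE B (Python) =====
-- def _build_hierarchy_xml(hierarchy):
--     """Build XML for merchant hierarchy (field-table version)."""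
--     if not hierarchy:
--         return ""
--
--     fields = [
--         ("LevelCode", "levelCode", ""),
--         ("MerchantName", "merchantName", ""),
--         ("AddressAttentionText", "addressAttentionText", ""),
--         ("Address1Text", "address1Text", ""),
--         ("CityName", "cityName", ""),
--         ("StateCode", "stateCode", ""),
--         ("CountryCode", "countryCode", "US"),
--         ("PostalCode", "postalCode", ""),
--         ("PhoneNumber", "phoneNumber", ""),
--     ]
--
--     return "\n".join(
--         "\n    <HierarchyLevel>\n"
--         + "\n".join(f"        <{tag}>{level.get(key, default)}</{tag}>"
--                     for tag, key, default in fields)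
--         + "\n    </HierarchyLevel>"
--         for level in hierarchy
--     )
-- ===== Notes on version B (the rewrite author's own statement) =====
-- stated objective: simpler
-- what changed: Replaces the hard-coded nine-field template string per level with a data-driven ordered (tag, key, default) field table, generating each line from the table and joining the pieces.
import Mathlib
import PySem

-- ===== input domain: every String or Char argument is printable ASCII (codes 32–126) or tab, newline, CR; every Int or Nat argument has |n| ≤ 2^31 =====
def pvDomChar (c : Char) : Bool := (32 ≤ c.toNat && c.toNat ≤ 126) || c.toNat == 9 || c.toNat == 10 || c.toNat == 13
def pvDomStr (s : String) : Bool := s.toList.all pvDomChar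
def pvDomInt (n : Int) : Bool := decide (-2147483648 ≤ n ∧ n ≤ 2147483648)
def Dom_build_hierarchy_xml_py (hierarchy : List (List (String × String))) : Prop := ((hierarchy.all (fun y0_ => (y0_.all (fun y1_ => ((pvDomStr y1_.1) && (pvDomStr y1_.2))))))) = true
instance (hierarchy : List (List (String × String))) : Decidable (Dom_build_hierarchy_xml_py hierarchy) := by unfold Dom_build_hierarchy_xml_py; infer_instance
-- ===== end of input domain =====

set_option maxRecDepth 100000
set_option maxHeartbeats 4000000

-- B builds each level from an ordered (tag, key, default) field table instead of A's
-- hard-coded nine-field template string; objective: simpler/clearer decomposition, same output.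

-- level.get(k, d) on the assoc-list dict: first match wins (lookup helper shared by both ports)
def pvGetD (level : List (String × String)) (k d : String) : String :=
  match level.find? (fun p => p.1 == k) with
  | some p => p.2
  | none => d

-- ===== PORT A =====
def build_hierarchy_xml_py (hierarchy : List (List (String × String))) : String :=
  if hierarchy = [] then ""
  else
    PySem.Str.join "\n" <| hierarchy.foldl (fun acc level =>
      acc ++ ["\n    <HierarchyLevel>\n        <LevelCode>" ++ pvGetD level "levelCode" ""
        ++ "</LevelCode>\n        <MerchantName>" ++ pvGetD level "merchantName" ""
        ++ "</MerchantName>\n        <AddressAttentionText>" ++ pvGetD level "addressAttentionText" ""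
        ++ "</AddressAttentionText>\n        <Address1Text>" ++ pvGetD level "address1Text" ""
        ++ "</Address1Text>\n        <CityName>" ++ pvGetD level "cityName" ""
        ++ "</CityName>\n        <StateCode>" ++ pvGetD level "stateCode" ""
        ++ "</StateCode>\n        <CountryCode>" ++ pvGetD level "countryCode" "US"
        ++ "</CountryCode>\n        <PostalCode>" ++ pvGetD level "postalCode" ""
        ++ "</PostalCode>\n        <PhoneNumber>" ++ pvGetD level "phoneNumber" ""
        ++ "</PhoneNumber>\n    </HierarchyLevel>"]) []

-- ===== PORT B =====
def pvFields : List (String × String × String) :=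
  [("LevelCode", "levelCode", ""),
   ("MerchantName", "merchantName", ""),
   ("AddressAttentionText", "addressAttentionText", ""),
   ("Address1Text", "address1Text", ""),
   ("CityName", "cityName", ""),
   ("StateCode", "stateCode", ""),
   ("CountryCode", "countryCode", "US"),
   ("PostalCode", "postalCode", ""),
   ("PhoneNumber", "phoneNumber", "")]

def build_hierarchy_xml_py_alt (hierarchy : List (List (String × String))) : String :=
  if hierarchy = [] then ""
  else
    PySem.Str.join "\n" (hierarchy.map (fun level =>
      "\n    <HierarchyLevel>\n"
      ++ PySem.Str.join "\n" (pvFields.map (fun f =>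
           "        <" ++ f.1 ++ ">" ++ pvGetD level f.2.1 f.2.2 ++ "</" ++ f.1 ++ ">"))
      ++ "\n    </HierarchyLevel>"))

-- ===== PRECONDITION & SPEC =====
def Spec_build_hierarchy_xml_py (hierarchy : List (List (String × String))) (out : String) : Prop := out = build_hierarchy_xml_py_alt hierarchy
instance (hierarchy : List (List (String × String))) (out : String) : Decidable (Spec_build_hierarchy_xml_py hierarchy out) := by unfold Spec_build_hierarchy_xml_py; infer_instance

-- ===== CLAIM (what is proved, stated in full; the proofs are below) =====
def Claim_equal_build_hierarchy_xml_py : Prop := ∀ (hierarchy : List (List (String × String))), Dom_build_hierarchy_xml_py hierarchy → Spec_build_hierarchy_xml_py hierarchy (build_hierarchy_xml_py hierarchy)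

-- ===== LEMMAS AND PROOFS =====
theorem str_join_singleton (s a : String) : PySem.Str.join s [a] = a := by
  rw [← String.toList_inj]; simp [PySem.Str.toList_join, PySem.Chars.join, List.intercalate]

theorem str_join_cons (s a b : String) (l : List String) :
    PySem.Str.join s (a :: b :: l) = a ++ s ++ PySem.Str.join s (b :: l) := by
  rw [← String.toList_inj]; simp [PySem.Str.toList_join, PySem.Chars.join, List.intercalate]

-- the two per-level blocks are the same string
theorem level_block_eq (level : List (String × String)) :
    "\n    <HierarchyLevel>\n        <LevelCode>" ++ pvGetD level "levelCode" ""
        ++ "</LevelCode>\n        <MerchantName>" ++ pvGetD level "merchantName" ""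
        ++ "</MerchantName>\n        <AddressAttentionText>" ++ pvGetD level "addressAttentionText" ""
        ++ "</AddressAttentionText>\n        <Address1Text>" ++ pvGetD level "address1Text" ""
        ++ "</Address1Text>\n        <CityName>" ++ pvGetD level "cityName" ""
        ++ "</CityName>\n        <StateCode>" ++ pvGetD level "stateCode" ""
        ++ "</StateCode>\n        <CountryCode>" ++ pvGetD level "countryCode" "US"
        ++ "</CountryCode>\n        <PostalCode>" ++ pvGetD level "postalCode" ""
        ++ "</PostalCode>\n        <PhoneNumber>" ++ pvGetD level "phoneNumber" ""
        ++ "</PhoneNumber>\n    </HierarchyLevel>"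
    = "\n    <HierarchyLevel>\n"
      ++ PySem.Str.join "\n" (pvFields.map (fun f =>
           "        <" ++ f.1 ++ ">" ++ pvGetD level f.2.1 f.2.2 ++ "</" ++ f.1 ++ ">"))
      ++ "\n    </HierarchyLevel>" := by
  simp only [pvFields, List.map_cons, List.map_nil]
  simp [str_join_cons, str_join_singleton, String.append_assoc]
  rw [← String.toList_inj]
  simp

-- ===== VERDICT (by name: the statement is the Claim_ definition above) =====
theorem build_hierarchy_xml_py_spec : Claim_equal_build_hierarchy_xml_py := by
  intro hierarchy _
  unfold Spec_build_hierarchy_xml_py build_hierarchy_xml_py build_hierarchy_xml_py_alt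
  by_cases h : hierarchy = []
  · rw [if_pos h, if_pos h]
  · rw [if_neg h, if_neg h, PySem.List.foldl_append_singleton_eq_map, List.nil_append]
    exact congrArg (PySem.Str.join "\n") (List.map_congr_left (fun level _ => level_block_eq level))
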